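-- pv_equiv track=rewrite | github.com/thiagoambiel/PortraitStylization | models/facenet/facial_features.py | _get_min_size
-- ===== SOURCE A (Python) =====
-- from typing import List, Tuple
--
-- def _get_min_size(layers: List[int]) -> int:
--     last_layer = max(layer for layer in layers if layer != 14)
--     min_size = 1
--
--     for layer in [4, 9, 18, 27, 36]:
--         if last_layer < layer:
--             break
--         min_size *= 2
--
--     return min_size
-- ===== SOURCE B (Python) =====
-- from typing import List
--
-- _TIER = ((36, 32), (27, 16), (18, 8), (9, 4), (4, 2))
--
-- def _size_of(layer: int) -> int:
--     for bound, size in _TIER: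
--         if layer >= bound:
--             return size
--     return 1
--
-- def _get_min_size(layers: List[int]) -> int:
--     return max(_size_of(layer) for layer in layers if layer != 14)
-- ===== Notes on version B (the rewrite author's own statement) =====
-- stated objective: alternative
-- what changed: Instead of taking the max layer and then running a threshold loop on it, B maps every layer directly to its size via a monotone tier table and returns the max of the sizes (correct because the tier map is monotone, so it commutes with max).
import Mathlib
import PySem

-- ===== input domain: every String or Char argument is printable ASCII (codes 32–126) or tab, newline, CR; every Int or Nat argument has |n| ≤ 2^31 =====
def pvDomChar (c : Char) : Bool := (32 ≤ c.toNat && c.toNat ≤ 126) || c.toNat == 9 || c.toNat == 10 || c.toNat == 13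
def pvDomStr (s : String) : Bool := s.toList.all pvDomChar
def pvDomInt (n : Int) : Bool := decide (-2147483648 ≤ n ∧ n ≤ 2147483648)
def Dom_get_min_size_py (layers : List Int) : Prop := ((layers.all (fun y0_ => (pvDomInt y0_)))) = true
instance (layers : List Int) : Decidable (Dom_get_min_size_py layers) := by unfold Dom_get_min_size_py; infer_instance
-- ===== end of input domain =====

-- B maps each layer to its size via a monotone tier table and takes the max of the sizes,
-- instead of A's max-layer-then-threshold-loop (alternative decomposition, same cost).

-- ===== PORT A =====
-- A's break-loop over thresholds: min_size doubles until last_layer < threshold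
def pvLoopA : List Int → Int → Int → Int
  | [], _, min_size => min_size
  | layer :: rest, last_layer, min_size =>
    if last_layer < layer then min_size
    else pvLoopA rest last_layer (min_size * 2)

def get_min_size_py (layers : List Int) : Int :=
  match PySem.List.max? (layers.filter (fun layer => layer ≠ 14)) (fun x => x) with
  | none => 0   -- unreachable under Pre_ (Python raises ValueError here)
  | some last_layer => pvLoopA [4, 9, 18, 27, 36] last_layer 1

-- ===== PORT B =====
-- _size_of: loop over the tier table, return first size whose bound the layer reaches
def pvSizeOf (layer : Int) : Int :=
  pvSizeLoop [(36, 32), (27, 16), (18, 8), (9, 4), (4, 2)] layer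
where
  pvSizeLoop : List (Int × Int) → Int → Int
    | [], _ => 1
    | (bound, size) :: rest, layer =>
      if layer ≥ bound then size else pvSizeLoop rest layer

def get_min_size_py_alt (layers : List Int) : Int :=
  match PySem.List.max? ((layers.filter (fun layer => layer ≠ 14)).map pvSizeOf) (fun x => x) with
  | none => 0   -- unreachable under Pre_ (Python raises ValueError here)
  | some m => m

-- ===== PRECONDITION & SPEC =====
-- Pre_ excludes exactly the inputs (no element ≠ 14) on which Python's max() raises ValueError in both A and B.
def Pre_get_min_size_py (layers : List Int) : Prop := ∃ l ∈ layers, l ≠ 14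
instance (layers : List Int) : Decidable (Pre_get_min_size_py layers) := by unfold Pre_get_min_size_py; infer_instance
def pvWitness_get_min_size_py : List Int := [4, 14, 9]

def Spec_get_min_size_py (layers : List Int) (out : Int) : Prop := out = get_min_size_py_alt layers
instance (layers : List Int) (out : Int) : Decidable (Spec_get_min_size_py layers out) := by unfold Spec_get_min_size_py; infer_instance

-- ===== CLAIM (what is proved, stated in full; the proofs are below) =====
def Claim_equal_get_min_size_py : Prop := ∀ (layers : List Int), Dom_get_min_size_py layers → Pre_get_min_size_py layers → Spec_get_min_size_py layers (get_min_size_py layers)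

-- ===== LEMMAS AND PROOFS =====
-- A's threshold loop computes exactly the tier size of its argument
theorem pvLoopA_eq_sizeOf (last : Int) :
    pvLoopA [4, 9, 18, 27, 36] last 1 = pvSizeOf last := by
  simp only [pvLoopA, pvSizeOf, pvSizeOf.pvSizeLoop]
  split_ifs <;> omega

-- pvSizeOf is monotone, hence commutes with binary max
theorem pvSizeOf_max (a b : Int) : pvSizeOf (max a b) = max (pvSizeOf a) (pvSizeOf b) := by
  simp only [pvSizeOf, pvSizeOf.pvSizeLoop]
  rcases le_total a b with h | h <;> simp [h] <;>
    split_ifs <;> omega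

-- running max of mapped list = map of running max
theorem foldl_max_map (t : List Int) (x : Int) :
    (t.map pvSizeOf).foldl max (pvSizeOf x) = pvSizeOf (t.foldl max x) := by
  induction t generalizing x with
  | nil => rfl
  | cons y ys ih => simp [List.foldl, ← pvSizeOf_max, ih]

-- ===== VERDICT (by name: the statement is the Claim_ definition above) =====
theorem get_min_size_py_spec : Claim_equal_get_min_size_py := by
  intro layers _ hpre
  unfold Spec_get_min_size_py get_min_size_py get_min_size_py_alt
  cases hxs : layers.filter (fun layer => layer ≠ 14) with
  | nil => rfl
  | cons x t =>
    rw [List.map_cons, PySem.List.max?_id_cons, PySem.List.max?_id_cons]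
    simpa [pvLoopA_eq_sizeOf] using (foldl_max_map t x).symm
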